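-- pv_equiv track=rewrite | github.com/sukumDev123/twitter-analyser | api/views.py | handle_textType
-- ===== SOURCE A (Python) =====
-- def handle_textType(predResult, tweet):
--     data_1 = [
--         tweet[ind] for ind, data in enumerate(predResult)
--         if '{}'.format(data) == "1"
--     ]
--     data_1Neg = [
--         tweet[ind] for ind, data in enumerate(predResult)
--         if '{}'.format(data) == "-1"
--     ]
--     data_0 = [
--         tweet[ind] for ind, data in enumerate(predResult)
--         if '{}'.format(data) == "0"
--     ]
--     return {"good": data_1[:10], "neg": data_1Neg[:10], "neutral": data_0[:10]}
-- ===== SOURCE B (Python) =====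
-- def handle_textType(predResult, tweet):
--     good, neg, neutral = [], [], []
--     for ind, data in enumerate(predResult):
--         s = '{}'.format(data)
--         if s == "1":
--             good.append(tweet[ind])
--         elif s == "-1":
--             neg.append(tweet[ind])
--         elif s == "0":
--             neutral.append(tweet[ind])
--     return {"good": good[:10], "neg": neg[:10], "neutral": neutral[:10]}
-- ===== Notes on version B (the rewrite author's own statement) =====
-- stated objective: alternative
-- what changed: Replaces A's three separate filtering passes over enumerate(predResult) with one partitioning pass that appends each tweet to the matching bucket as it goes.
import Mathlib
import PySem

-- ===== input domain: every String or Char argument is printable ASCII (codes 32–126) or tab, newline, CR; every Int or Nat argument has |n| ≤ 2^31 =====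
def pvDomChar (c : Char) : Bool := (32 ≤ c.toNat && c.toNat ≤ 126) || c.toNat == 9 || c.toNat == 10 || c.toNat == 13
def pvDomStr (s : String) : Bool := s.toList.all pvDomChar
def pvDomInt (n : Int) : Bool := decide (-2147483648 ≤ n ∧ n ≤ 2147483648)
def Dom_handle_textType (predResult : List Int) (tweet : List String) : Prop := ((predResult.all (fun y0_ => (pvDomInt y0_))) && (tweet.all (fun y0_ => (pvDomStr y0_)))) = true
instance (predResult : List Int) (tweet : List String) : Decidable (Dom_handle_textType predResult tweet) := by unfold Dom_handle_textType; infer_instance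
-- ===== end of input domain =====

-- B replaces A's three filtering passes over enumerate(predResult) with a single partitioning pass (alternative decomposition, same result).


-- ===== PORT A =====
-- Three list comprehensions over enumerate(predResult); tweet[ind] is PySem.List.pyGet?
-- (the `.getD ""` default is never reached inside Pre_, which excludes exactly the IndexError inputs).
def handle_textType (predResult : List Int) (tweet : List String) : List (String × List String) :=
  let data_1 :=
    ((PySem.List.enumerate predResult).filter (fun p => PySem.Int.toStr p.2 == "1")).map
      (fun p => (PySem.List.pyGet? tweet p.1).getD "")
  let data_1Neg :=
    ((PySem.List.enumerate predResult).filter (fun p => PySem.Int.toStr p.2 == "-1")).map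
      (fun p => (PySem.List.pyGet? tweet p.1).getD "")
  let data_0 :=
    ((PySem.List.enumerate predResult).filter (fun p => PySem.Int.toStr p.2 == "0")).map
      (fun p => (PySem.List.pyGet? tweet p.1).getD "")
  [("good", data_1.take 10), ("neg", data_1Neg.take 10), ("neutral", data_0.take 10)]

-- ===== PORT B =====
-- one pass: fold over enumerate(predResult) appending to the matching bucket
def pvStep (tweet : List String) (acc : List String × List String × List String)
    (p : Int × Int) : List String × List String × List String :=
  let s := PySem.Int.toStr p.2
  let t := (PySem.List.pyGet? tweet p.1).getD ""
  if s == "1" then (acc.1 ++ [t], acc.2.1, acc.2.2)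
  else if s == "-1" then (acc.1, acc.2.1 ++ [t], acc.2.2)
  else if s == "0" then (acc.1, acc.2.1, acc.2.2 ++ [t])
  else acc

def handle_textType_alt (predResult : List Int) (tweet : List String) : List (String × List String) :=
  let st := (PySem.List.enumerate predResult).foldl (pvStep tweet) ([], [], [])
  [("good", st.1.take 10), ("neg", st.2.1.take 10), ("neutral", st.2.2.take 10)]

-- ===== PRECONDITION & SPEC =====
-- Pre_ excludes exactly the IndexError inputs: an index whose label is 1, -1 or 0 but lies beyond tweet.
def Pre_handle_textType (predResult : List Int) (tweet : List String) : Prop :=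
  ∀ p ∈ PySem.List.enumerate predResult,
    (p.2 = 1 ∨ p.2 = -1 ∨ p.2 = 0) → p.1 < (tweet.length : Int)
instance (predResult : List Int) (tweet : List String) : Decidable (Pre_handle_textType predResult tweet) := by unfold Pre_handle_textType; infer_instance
def pvWitness_handle_textType : List Int × List String := ([1, -1, 0, 5], ["a", "b", "c", "d"])
def Spec_handle_textType (predResult : List Int) (tweet : List String) (out : List (String × List String)) : Prop := out = handle_textType_alt predResult tweet
instance (predResult : List Int) (tweet : List String) (out : List (String × List String)) : Decidable (Spec_handle_textType predResult tweet out) := by unfold Spec_handle_textType; infer_instance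

-- ===== CLAIM (what is proved, stated in full; the proofs are below) =====
def Claim_equal_handle_textType : Prop := ∀ (predResult : List Int) (tweet : List String), Dom_handle_textType predResult tweet → Pre_handle_textType predResult tweet → Spec_handle_textType predResult tweet (handle_textType predResult tweet)

-- ===== LEMMAS AND PROOFS =====

-- the one-pass fold appends to each bucket exactly what the three filter passes collect
theorem fold_partition (tweet : List String) (l : List (Int × Int))
    (g n z : List String) :
    l.foldl (pvStep tweet) (g, n, z) =
    (g ++ (l.filter (fun p => PySem.Int.toStr p.2 == "1")).map
        (fun p => (PySem.List.pyGet? tweet p.1).getD ""),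
     n ++ (l.filter (fun p => PySem.Int.toStr p.2 == "-1")).map
        (fun p => (PySem.List.pyGet? tweet p.1).getD ""),
     z ++ (l.filter (fun p => PySem.Int.toStr p.2 == "0")).map
        (fun p => (PySem.List.pyGet? tweet p.1).getD "")) := by
  induction l generalizing g n z with
  | nil => simp
  | cons hd tl ih =>
    rw [List.foldl_cons]
    by_cases h1 : PySem.Int.toStr hd.2 = "1"
    · rw [show pvStep tweet (g, n, z) hd
          = (g ++ [(PySem.List.pyGet? tweet hd.1).getD ""], n, z) from by
            simp [pvStep, h1], ih]
      simp [List.filter_cons, h1, List.append_assoc]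
    · by_cases h2 : PySem.Int.toStr hd.2 = "-1"
      · rw [show pvStep tweet (g, n, z) hd
            = (g, n ++ [(PySem.List.pyGet? tweet hd.1).getD ""], z) from by
              simp [pvStep, h1, h2], ih]
        simp [List.filter_cons, h1, h2, List.append_assoc]
      · by_cases h3 : PySem.Int.toStr hd.2 = "0"
        · rw [show pvStep tweet (g, n, z) hd
              = (g, n, z ++ [(PySem.List.pyGet? tweet hd.1).getD ""]) from by
                simp [pvStep, h1, h2, h3], ih]
          simp [List.filter_cons, h1, h2, h3, List.append_assoc]
        · rw [show pvStep tweet (g, n, z) hd = (g, n, z) from by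
                simp [pvStep, h1, h2, h3], ih]
          simp [List.filter_cons, h1, h2, h3]

-- ===== VERDICT (by name: the statement is the Claim_ definition above) =====
theorem handle_textType_spec : Claim_equal_handle_textType := by
  intro predResult tweet _ _
  show handle_textType predResult tweet = handle_textType_alt predResult tweet
  dsimp only [handle_textType, handle_textType_alt]
  rw [fold_partition]
  simp
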